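-- pv_equiv track=rewrite | github.com/PathfinderFederalSolutions/AgentForge | libs/af-messaging/src/af_messaging/subject.py | validate_subject
-- ===== SOURCE A (Python) =====
-- def validate_subject(subject: str) -> bool:
--     """Validate subject format"""
--     if not subject:
--         return False
--
--     # Basic NATS subject validation
--     if subject.startswith(".") or subject.endswith("."):
--         return False
--
--     if ".." in subject:
--         return False
--
--     # Check for valid characters
--     valid_chars = set("abcdefghijklmnopqrstuvwxyzABCDEFGHIJKLMNOPQRSTUVWXYZ0123456789.-_")
--     if not all(c in valid_chars for c in subject):
--         return False
--
--     return True
-- ===== SOURCE B (Python) =====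
-- def validate_subject(subject: str) -> bool:
--     """Validate subject format"""
--     if not subject:
--         return False
--     valid = set("abcdefghijklmnopqrstuvwxyzABCDEFGHIJKLMNOPQRSTUVWXYZ0123456789-_")
--     return all(tok != "" and all(c in valid for c in tok)
--                for tok in subject.split("."))
-- ===== Notes on version B (the rewrite author's own statement) =====
-- stated objective: idiomatic
-- what changed: B splits the subject at the dot separator and checks that every token is nonempty and drawn from a dot-free alphabet, replacing A's separate prefix/suffix/doubled-separator substring checks and its character scan over a dot-including alphabet.
import Mathlib
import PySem

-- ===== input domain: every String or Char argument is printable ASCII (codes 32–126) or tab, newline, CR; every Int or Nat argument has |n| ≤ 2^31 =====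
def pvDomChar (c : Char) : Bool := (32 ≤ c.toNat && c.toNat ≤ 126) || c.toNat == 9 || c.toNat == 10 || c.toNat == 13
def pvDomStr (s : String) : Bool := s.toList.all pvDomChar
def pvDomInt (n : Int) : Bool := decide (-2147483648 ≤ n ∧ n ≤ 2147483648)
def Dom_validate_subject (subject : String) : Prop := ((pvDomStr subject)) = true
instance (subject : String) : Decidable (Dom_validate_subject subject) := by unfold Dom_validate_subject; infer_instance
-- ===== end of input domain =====

-- B replaces A's prefix/suffix/doubled-separator substring checks and dot-including character
-- scan by splitting at the dot and testing each token nonempty over a dot-free alphabet (idiomatic).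

-- ===== PORT A =====
def validCharsA : PySem.Set Char :=
  PySem.Set.ofList "abcdefghijklmnopqrstuvwxyzABCDEFGHIJKLMNOPQRSTUVWXYZ0123456789.-_".toList

def validate_subject (subject : String) : Bool :=
  if subject.toList.isEmpty then false
  else if PySem.Str.startswith subject "." || PySem.Str.endswith subject "." then false
  else if PySem.Str.isIn ".." subject then false
  else if !(subject.toList.all (fun c => PySem.Set.contains validCharsA c)) then false
  else true

-- ===== PORT B =====
def validCharsB : PySem.Set Char :=
  PySem.Set.ofList "abcdefghijklmnopqrstuvwxyzABCDEFGHIJKLMNOPQRSTUVWXYZ0123456789-_".toList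

def validate_subject_alt (subject : String) : Bool :=
  if subject.toList.isEmpty then false
  else (PySem.Chars.splitOn subject.toList ".".toList).all
        (fun tok => !tok.isEmpty && tok.all (fun c => PySem.Set.contains validCharsB c))

-- ===== PRECONDITION & SPEC =====
def Spec_validate_subject (subject : String) (out : Bool) : Prop := out = validate_subject_alt subject
instance (subject : String) (out : Bool) : Decidable (Spec_validate_subject subject out) := by unfold Spec_validate_subject; infer_instance

-- ===== CLAIM (what is proved, stated in full; the proofs are below) =====
def Claim_equal_validate_subject : Prop := ∀ (subject : String), Dom_validate_subject subject → Spec_validate_subject subject (validate_subject subject)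

-- ===== LEMMAS AND PROOFS =====

-- structural model of str.split('.'): first token and remaining tokens
def pvFS : List Char → List Char × List (List Char)
  | [] => ([], [])
  | c :: r =>
    let p := pvFS r
    if c = '.' then ([], p.1 :: p.2) else (c :: p.1, p.2)

lemma pvFS_go (fuel : Nat) : ∀ (l cur : List Char) (acc : List (List Char)), l.length < fuel →
    PySem.Chars.splitOn.go ['.'] fuel l cur acc =
      acc.reverse ++ (cur.reverse ++ (pvFS l).1) :: (pvFS l).2 := by
  induction fuel with
  | zero => intro l cur acc h; omega
  | succ n ih =>
    intro l cur acc h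
    cases l with
    | nil =>
      rw [PySem.Chars.splitOn.go.eq_def]
      simp [pvFS]
    | cons c r =>
      by_cases hc : c = '.'
      · subst hc
        have hp : (['.'] : List Char).isPrefixOf ('.' :: r) = true := by
          simp [List.isPrefixOf]
        rw [PySem.Chars.splitOn.go.eq_def]
        simp only [hp, if_pos, List.drop_succ_cons, List.length_nil, List.drop_zero, List.length_cons]
        rw [ih r [] (cur.reverse :: acc) (by simp at h; omega)]
        simp [pvFS]
      · have hp : (['.'] : List Char).isPrefixOf (c :: r) = false := by
          simp [List.isPrefixOf]; intro h'; exact hc h'.symm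
        rw [PySem.Chars.splitOn.go.eq_def]
        simp only [hp, Bool.false_eq_true, if_false]
        rw [ih r (c :: cur) acc (by simp at h; omega)]
        simp [pvFS, hc]

lemma splitOn_dot (l : List Char) :
    PySem.Chars.splitOn l ['.'] = (pvFS l).1 :: (pvFS l).2 := by
  unfold PySem.Chars.splitOn
  rw [pvFS_go (l.length + 1) l [] [] (by omega)]
  simp

-- character-set split: A's alphabet is B's alphabet plus the dot
set_option maxRecDepth 4096 in
lemma vA_eq (c : Char) :
    PySem.Set.contains validCharsA c =
      (PySem.Set.contains validCharsB c || c == '.') := by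
  have e1 : "abcdefghijklmnopqrstuvwxyzABCDEFGHIJKLMNOPQRSTUVWXYZ0123456789.-_".toList
      = "abcdefghijklmnopqrstuvwxyzABCDEFGHIJKLMNOPQRSTUVWXYZ0123456789".toList ++ '.' :: "-_".toList := by decide
  have e2 : "abcdefghijklmnopqrstuvwxyzABCDEFGHIJKLMNOPQRSTUVWXYZ0123456789-_".toList
      = "abcdefghijklmnopqrstuvwxyzABCDEFGHIJKLMNOPQRSTUVWXYZ0123456789".toList ++ "-_".toList := by decide
  rw [Bool.eq_iff_iff]
  simp only [validCharsA, validCharsB, e1, e2, Bool.or_eq_true, beq_iff_eq,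
    PySem.Set.contains_iff, PySem.Set.mem_ofList, List.mem_append, List.mem_cons]
  tauto

-- A-side suffix condition: no trailing dot, no '..', all characters in A's alphabet
def pvSuf (l : List Char) : Prop :=
  l.getLast? ≠ some '.' ∧ ¬ (['.', '.'] <:+: l) ∧
    ∀ c ∈ l, PySem.Set.contains validCharsA c = true

def pvGood (t : List Char) : Bool :=
  !t.isEmpty && t.all (fun c => PySem.Set.contains validCharsB c)

def pvQ (l : List Char) : Bool := pvGood (pvFS l).1 && (pvFS l).2.all pvGood
def pvR (l : List Char) : Bool :=
  (pvFS l).1.all (fun c => PySem.Set.contains validCharsB c) && (pvFS l).2.all pvGood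

lemma singleton_prefix_iff (a : Char) (l : List Char) : ([a] <+: l) ↔ l.head? = some a := by
  cases l with
  | nil => simp
  | cons b t => simp [List.cons_prefix_cons, eq_comm]

lemma singleton_suffix_iff (a : Char) (l : List Char) : ([a] <:+ l) ↔ l.getLast? = some a := by
  rw [← List.reverse_prefix (l₁ := [a]), List.reverse_cons, List.reverse_nil, List.nil_append,
    singleton_prefix_iff, List.head?_reverse]

lemma not_infix_singleton (c : Char) : ¬ (['.', '.'] <:+: [c]) := by
  intro h; have := h.length_le; simp at this

set_option maxRecDepth 4096 in
lemma mainQR : ∀ l : List Char,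
    (pvQ l = true ↔ (l ≠ [] ∧ l.head? ≠ some '.' ∧ pvSuf l)) ∧
    (pvR l = true ↔ (l = [] ∨ pvSuf l)) := by
  intro l
  induction l with
  | nil =>
    constructor
    · simp [pvQ, pvFS, pvGood]
    · simp [pvR, pvFS]
  | cons c r ih =>
    obtain ⟨ih1, ih2⟩ := ih
    by_cases hc : c = '.'
    · subst hc
      constructor
      · constructor
        · intro h; exfalso; simp [pvQ, pvFS, pvGood] at h
        · rintro ⟨-, hh, -⟩; simp at hh
      · -- pvR ('.' :: r) = pvQ r
        have hR : pvR ('.' :: r) = pvQ r := by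
          simp [pvR, pvQ, pvFS, pvGood]
        rw [hR, ih1]
        constructor
        · rintro ⟨hne, hh, hlast, hinf, hall⟩
          right
          refine ⟨?_, ?_, ?_⟩
          · cases r with
            | nil => simp at hne
            | cons b t => simpa [List.getLast?_cons_cons] using hlast
          · rw [List.infix_cons_iff]
            rintro (hpre | hinf')
            · rw [List.cons_prefix_cons] at hpre
              exact hh (by rw [singleton_prefix_iff] at hpre; exact hpre.2)
            · exact hinf hinf'
          · intro x hx
            simp only [List.mem_cons] at hx
            rcases hx with rfl | hx
            · decide
            · exact hall x hx
        · rintro (h | ⟨hlast, hinf, hall⟩)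
          · simp at h
          · have hne : r ≠ [] := by
              rintro rfl; simp at hlast
            refine ⟨hne, ?_, ?_, ?_, ?_⟩
            · intro hh
              exact hinf (List.infix_cons_iff.mpr (Or.inl (by
                rw [List.cons_prefix_cons]
                exact ⟨rfl, (singleton_prefix_iff '.' r).mpr hh⟩)))
            · cases r with
              | nil => exact absurd rfl hne
              | cons b t => simpa [List.getLast?_cons_cons] using hlast
            · intro hinf'; exact hinf (List.infix_cons_iff.mpr (Or.inr hinf'))
            · intro x hx; exact hall x (List.mem_cons_of_mem _ hx)
    · -- c ≠ '.'
      have hQR : pvQ (c :: r) = (PySem.Set.contains validCharsB c && pvR r) ∧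
                 pvR (c :: r) = (PySem.Set.contains validCharsB c && pvR r) := by
        constructor <;> simp [pvQ, pvR, pvFS, hc, pvGood, Bool.and_assoc]
      have hSuf : pvSuf (c :: r) ↔
          (PySem.Set.contains validCharsA c = true ∧ (r = [] ∨ pvSuf r)) := by
        constructor
        · rintro ⟨hlast, hinf, hall⟩
          refine ⟨hall c (List.mem_cons_self), ?_⟩
          cases r with
          | nil => exact Or.inl rfl
          | cons b t =>
            right
            refine ⟨by simpa [List.getLast?_cons_cons] using hlast,
              fun h => hinf (List.infix_cons_iff.mpr (Or.inr h)),
              fun x hx => hall x (List.mem_cons_of_mem _ hx)⟩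
        · rintro ⟨hcA, h | ⟨hlast, hinf, hall⟩⟩
          · subst h
            exact ⟨by simp [hc], not_infix_singleton c, by simpa using hcA⟩
          · refine ⟨?_, ?_, ?_⟩
            · cases r with
              | nil => simp [hc]
              | cons b t => simpa [List.getLast?_cons_cons] using hlast
            · rw [List.infix_cons_iff]
              rintro (hpre | hinf')
              · rw [List.cons_prefix_cons] at hpre; exact hc hpre.1.symm
              · exact hinf hinf'
            · intro x hx
              rcases List.mem_cons.mp hx with rfl | hx
              · exact hcA
              · exact hall x hx
      have hvc : PySem.Set.contains validCharsA c = PySem.Set.contains validCharsB c := by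
        rw [vA_eq]; simp [hc]
      constructor
      · rw [hQR.1]
        simp only [Bool.and_eq_true, ih2]
        constructor
        · rintro ⟨hb, hr⟩
          exact ⟨List.cons_ne_nil _ _, by simp [hc], hSuf.mpr ⟨by rw [hvc]; exact hb, hr⟩⟩
        · rintro ⟨-, -, hs⟩
          obtain ⟨h1, h2⟩ := hSuf.mp hs
          exact ⟨by rw [← hvc]; exact h1, h2⟩
      · rw [hQR.2]
        simp only [Bool.and_eq_true, ih2]
        constructor
        · rintro ⟨hb, hr⟩
          exact Or.inr (hSuf.mpr ⟨by rw [hvc]; exact hb, hr⟩)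
        · rintro (h | hs)
          · simp at h
          · obtain ⟨h1, h2⟩ := hSuf.mp hs
            exact ⟨by rw [← hvc]; exact h1, h2⟩

-- ===== VERDICT (by name: the statement is the Claim_ definition above) =====
theorem validate_subject_spec : Claim_equal_validate_subject := by
  intro s _
  unfold Spec_validate_subject
  by_cases h : s.toList = []
  · simp [validate_subject, validate_subject_alt, h]
  · have hB : validate_subject_alt s = pvQ s.toList := by
      have hd : ".".toList = ['.'] := by decide
      have hpg : pvGood = (fun tok => !tok.isEmpty && tok.all fun c => decide (c ∈ validCharsB)) := by
        funext t; simp [pvGood]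
      simp [validate_subject_alt, h, hd, splitOn_dot, pvQ, hpg]
    have hA : validate_subject s = true ↔
        (¬ ['.'] <+: s.toList ∧ ¬ ['.'] <:+ s.toList ∧ ¬ (['.','.'] <:+: s.toList) ∧
          ∀ c ∈ s.toList, PySem.Set.contains validCharsA c = true) := by
      have h1 : ".".toList = ['.'] := by decide
      have h2 : "..".toList = ['.','.'] := by decide
      simp [validate_subject, h, h1, h2, PySem.Chars.startswith_iff,
        PySem.Chars.endswith_iff, PySem.Chars.isIn_iff_infix,
        -Bool.forall_bool, and_assoc]
    rw [hB, Bool.eq_iff_iff, hA, (mainQR s.toList).1]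
    rw [singleton_prefix_iff, singleton_suffix_iff]
    unfold pvSuf
    tauto
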